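-- pv_equiv track=rewrite | github.com/Aryudesu/myLibrary | math/partition.py | _calcPentagon
-- ===== SOURCE A (Python) =====
-- def _calcPentagon(num: int) -> list:
--     """五角数と符号の事前計算を行います"""
--     result = []
--     for i in range(1, num + 1):
--         g1, g2 = i * (3 * i - 1) // 2, i * (3 * i + 1) // 2
--         if g1 > num and g2 > num:
--             break
--         sign = 1 if i % 2 else -1
--         if g1 <= num:
--             result.append((g1, sign))
--         if g2 <= num:
--             result.append((g2, sign))
--     result.sort()
--     return result
-- ===== SOURCE B (Python) =====
-- def _calcPentagon(num: int) -> list: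
--     """五角数と符号の事前計算を行います"""
--     def seq(second):
--         c = 1 if second else -1
--         out = []
--         i = 1
--         while True:
--             g = i * (3 * i + c) // 2
--             if g > num:
--                 return out
--             out.append((g, 1 if i % 2 else -1))
--             i += 1
--     xs, ys = seq(False), seq(True)
--     res = []
--     a = b = 0
--     while a < len(xs) and b < len(ys):
--         if xs[a][0] <= ys[b][0]:
--             res.append(xs[a]); a += 1
--         else:
--             res.append(ys[b]); b += 1
--     return res + xs[a:] + ys[b:]
-- ===== Notes on version B (the rewrite author's own statement) =====
-- stated objective: alternative
-- what changed: Replaces A's single interleaved bounded loop with conditional appends plus a final sort by two staged passes: generate the two monotone pentagonal sequences g1(i) and g2(i) separately, then combine them with a two-pointer merge, so no sort is needed.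
import Mathlib
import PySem

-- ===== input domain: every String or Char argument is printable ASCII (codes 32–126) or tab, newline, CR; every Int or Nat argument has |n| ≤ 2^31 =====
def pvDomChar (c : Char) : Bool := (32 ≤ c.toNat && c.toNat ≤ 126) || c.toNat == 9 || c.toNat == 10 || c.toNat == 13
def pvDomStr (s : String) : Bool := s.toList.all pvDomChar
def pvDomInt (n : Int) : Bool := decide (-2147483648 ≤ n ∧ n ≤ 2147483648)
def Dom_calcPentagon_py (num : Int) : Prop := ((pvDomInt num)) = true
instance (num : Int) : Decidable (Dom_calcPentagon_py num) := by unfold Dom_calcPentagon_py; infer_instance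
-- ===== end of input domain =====

-- B replaces A's single interleaved loop + final sort by two staged generator passes
-- (the monotone sequences g1(i) and g2(i) separately) combined by a two-pointer merge;
-- objective: alternative decomposition, no claim of measured speed.

-- ===== PORT A =====
-- loop 'for i in range(1, num+1): …' with break, over the remaining range list
def pentLoopA (num : Int) : List Int → List (Int × Int) → List (Int × Int)
  | [], result => result
  | i :: rest, result =>
    let g1 := PySem.Int.floordiv (i * (3 * i - 1)) 2
    let g2 := PySem.Int.floordiv (i * (3 * i + 1)) 2
    if g1 > num ∧ g2 > num then result
    else
      let sign : Int := if PySem.Int.mod i 2 ≠ 0 then 1 else -1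
      let r1 := if g1 ≤ num then result ++ [(g1, sign)] else result
      let r2 := if g2 ≤ num then r1 ++ [(g2, sign)] else r1
      pentLoopA num rest r2

def calcPentagon_py (num : Int) : List (Int × Int) :=
  PySem.List.sorted2 (pentLoopA num (PySem.List.pyRange 1 (num + 1) 1) []) Prod.fst Prod.snd

-- ===== PORT B =====
-- termination helper for B's generator loop: the generated value g = i*(3i+c)//2 (c = ±1) is ≥ i
theorem pentSeq_term (num c : Int) (hc : -1 ≤ c) (i : Nat)
    (h : ¬ PySem.Int.floordiv ((i : Int) * (3 * (i : Int) + c)) 2 > num) :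
    (num + 1 - (i + 1 : Nat)).toNat < (num + 1 - (i : Nat)).toNat := by
  rw [PySem.Int.floordiv_eq_ediv_of_pos (by norm_num)] at h
  rcases Nat.eq_zero_or_pos i with h0 | h1
  · subst h0; norm_num at h ⊢; omega
  · have hx1 : (1 : Int) ≤ (i : Int) := by exact_mod_cast h1
    have hp : (0 : Int) ≤ (i : Int) * (3 * (i : Int) + c - 2) :=
      mul_nonneg (by omega) (by omega)
    have e : (i : Int) * (3 * (i : Int) + c) = (i : Int) * (3 * (i : Int) + c - 2) + 2 * (i : Int) := by
      ring
    omega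

-- helper 'seq(second)': the while-loop over i = 1, 2, 3, … generating one pentagonal sequence
def pentSeqB (num : Int) (second : Bool) (i : Nat) : List (Int × Int) :=
  if PySem.Int.floordiv ((i : Int) * (3 * (i : Int) + (if second then 1 else -1))) 2 > num then []
  else (PySem.Int.floordiv ((i : Int) * (3 * (i : Int) + (if second then 1 else -1))) 2,
        if PySem.Int.mod (i : Int) 2 ≠ 0 then (1 : Int) else -1) :: pentSeqB num second (i + 1)
  termination_by (num + 1 - i).toNat
  decreasing_by
    rename_i h
    refine pentSeq_term num _ ?_ i h
    split <;> norm_num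

-- the two-pointer merge loop (res + xs[a:] + ys[b:])
def pentMergeB : List (Int × Int) → List (Int × Int) → List (Int × Int)
  | [], ys => ys
  | x :: xs, [] => x :: xs
  | x :: xs, y :: ys =>
    if x.1 ≤ y.1 then x :: pentMergeB xs (y :: ys) else y :: pentMergeB (x :: xs) ys

def calcPentagon_py_alt (num : Int) : List (Int × Int) :=
  pentMergeB (pentSeqB num false 1) (pentSeqB num true 1)

-- ===== PRECONDITION & SPEC =====
def Spec_calcPentagon_py (num : Int) (out : List (Int × Int)) : Prop := out = calcPentagon_py_alt num
instance (num : Int) (out : List (Int × Int)) : Decidable (Spec_calcPentagon_py num out) := by unfold Spec_calcPentagon_py; infer_instance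

-- ===== CLAIM (what is proved, stated in full; the proofs are below) =====
def Claim_equal_calcPentagon_py : Prop := ∀ (num : Int), Dom_calcPentagon_py num → Spec_calcPentagon_py num (calcPentagon_py num)

-- ===== LEMMAS AND PROOFS =====

-- arithmetic facts about the two pentagonal values at index x ≥ 1 (after floordiv → ediv)
theorem pent_facts (x : Int) (hx : 1 ≤ x) :
    x ≤ PySem.Int.floordiv (x * (3 * x - 1)) 2 ∧
    PySem.Int.floordiv (x * (3 * x + 1)) 2 = PySem.Int.floordiv (x * (3 * x - 1)) 2 + x ∧
    PySem.Int.floordiv ((x + 1) * (3 * (x + 1) - 1)) 2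
      = PySem.Int.floordiv (x * (3 * x + 1)) 2 + (2 * x + 1) := by
  have hfd : ∀ a : Int, PySem.Int.floordiv a 2 = a / 2 := fun a =>
    PySem.Int.floordiv_eq_ediv_of_pos (by norm_num)
  have h1 : 2 * x ≤ x * (3 * x - 1) := by nlinarith [mul_nonneg (show (0:Int) ≤ 3*x by omega) (show (0:Int) ≤ x - 1 by omega)]
  have h2 : x * (3 * x + 1) = x * (3 * x - 1) + x * 2 := by ring
  have h3 : (x + 1) * (3 * (x + 1) - 1) = x * (3 * x + 1) + (2 * x + 1) * 2 := by ring
  rw [hfd, hfd, hfd, h2, h3]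
  omega

-- the two generators rewritten with the ±1 resolved
theorem seqB_false (num : Int) (i : Nat) :
    pentSeqB num false i =
      if PySem.Int.floordiv ((i : Int) * (3 * (i : Int) - 1)) 2 > num then []
      else (PySem.Int.floordiv ((i : Int) * (3 * (i : Int) - 1)) 2,
            if PySem.Int.mod (i : Int) 2 ≠ 0 then (1 : Int) else -1) :: pentSeqB num false (i + 1) := by
  rw [pentSeqB]
  norm_num [sub_eq_add_neg]

theorem seqB_true (num : Int) (i : Nat) :
    pentSeqB num true i =
      if PySem.Int.floordiv ((i : Int) * (3 * (i : Int) + 1)) 2 > num then []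
      else (PySem.Int.floordiv ((i : Int) * (3 * (i : Int) + 1)) 2,
            if PySem.Int.mod (i : Int) 2 ≠ 0 then (1 : Int) else -1) :: pentSeqB num true (i + 1) := by
  rw [pentSeqB]
  norm_num

-- merge with a right head smaller than every head of the left list pulls the right head out
theorem pentMergeB_cons_right (xs : List (Int × Int)) (y : Int × Int) (ys : List (Int × Int))
    (h : ∀ x ∈ xs.head?, ¬ x.1 ≤ y.1) :
    pentMergeB xs (y :: ys) = y :: pentMergeB xs ys := by
  cases xs with
  | nil => simp [pentMergeB]
  | cons x xs => simp [pentMergeB, h x (by simp)]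

-- merging the two generators from index i ≥ 1 interleaves them, one pair per index
theorem mergeAB (num : Int) (i : Nat) (hi : 1 ≤ i) :
    pentMergeB (pentSeqB num false i) (pentSeqB num true i) =
      if PySem.Int.floordiv ((i : Int) * (3 * (i : Int) - 1)) 2 > num then []
      else if PySem.Int.floordiv ((i : Int) * (3 * (i : Int) + 1)) 2 > num then
        [(PySem.Int.floordiv ((i : Int) * (3 * (i : Int) - 1)) 2,
          if PySem.Int.mod (i : Int) 2 ≠ 0 then (1 : Int) else -1)]
      else (PySem.Int.floordiv ((i : Int) * (3 * (i : Int) - 1)) 2,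
            if PySem.Int.mod (i : Int) 2 ≠ 0 then (1 : Int) else -1) ::
           (PySem.Int.floordiv ((i : Int) * (3 * (i : Int) + 1)) 2,
            if PySem.Int.mod (i : Int) 2 ≠ 0 then (1 : Int) else -1) ::
           pentMergeB (pentSeqB num false (i + 1)) (pentSeqB num true (i + 1)) := by
  have hx : (1 : Int) ≤ (i : Int) := by exact_mod_cast hi
  have ec : ((i + 1 : Nat) : Int) = (i : Int) + 1 := by push_cast; ring
  obtain ⟨f1, f2, f3⟩ := pent_facts (i : Int) hx
  by_cases hc1 : PySem.Int.floordiv ((i : Int) * (3 * (i : Int) - 1)) 2 > num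
  · rw [if_pos hc1, seqB_false num i, if_pos hc1, seqB_true num i, if_pos (by omega)]
    simp [pentMergeB]
  · rw [if_neg hc1]
    by_cases hc2 : PySem.Int.floordiv ((i : Int) * (3 * (i : Int) + 1)) 2 > num
    · rw [if_pos hc2, seqB_false num i, if_neg hc1, seqB_true num i, if_pos hc2]
      have hnil : pentSeqB num false (i + 1) = [] := by
        rw [seqB_false]
        rw [if_pos (by rw [ec]; omega)]
      rw [hnil]
      simp [pentMergeB]
    · rw [if_neg hc2, seqB_false num i, if_neg hc1, seqB_true num i, if_neg hc2]
      rw [pentMergeB, if_pos (by dsimp only; omega)]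
      congr 1
      apply pentMergeB_cons_right
      intro x hx'
      rw [seqB_false] at hx'
      by_cases hc3 : PySem.Int.floordiv (((i + 1 : Nat) : Int) * (3 * ((i + 1 : Nat) : Int) - 1)) 2 > num
      · rw [if_pos hc3] at hx'
        simp at hx'
      · rw [if_neg hc3] at hx'
        simp at hx'
        subst hx'
        dsimp only
        have hfd : ∀ a : Int, PySem.Int.floordiv a 2 = a / 2 := fun a =>
          PySem.Int.floordiv_eq_ediv_of_pos (by norm_num)
        simp only [hfd] at f3 ⊢
        omega

-- A's loop over range(i, num+1) appends exactly the merge of the two generators from i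
theorem pentLoopA_stop (num j : Int) (hj : 1 ≤ j)
    (h : num < PySem.Int.floordiv (j * (3 * j - 1)) 2) (acc : List (Int × Int)) :
    pentLoopA num (PySem.List.pyRange j (num + 1) 1) acc = acc := by
  obtain ⟨f1, f2, _⟩ := pent_facts j hj
  by_cases hr : j < num + 1
  · rw [PySem.List.pyRange_one_cons hr]
    simp only [pentLoopA]
    rw [if_pos ⟨by omega, by omega⟩]
  · rw [PySem.List.pyRange_one_eq_nil (by omega)]
    simp [pentLoopA]

theorem loopMerge (num : Int) (i : Nat) (hi : 1 ≤ i) (acc : List (Int × Int)) :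
    pentLoopA num (PySem.List.pyRange (i : Int) (num + 1) 1) acc =
      acc ++ pentMergeB (pentSeqB num false i) (pentSeqB num true i) := by
  have hx : (1 : Int) ≤ (i : Int) := by exact_mod_cast hi
  obtain ⟨f1, f2, f3⟩ := pent_facts (i : Int) hx
  rw [mergeAB num i hi]
  by_cases hr : (i : Int) < num + 1
  · rw [PySem.List.pyRange_one_cons hr]
    simp only [pentLoopA]
    by_cases hc1 : PySem.Int.floordiv ((i : Int) * (3 * (i : Int) - 1)) 2 > num
    · rw [if_pos ⟨hc1, by omega⟩, if_pos hc1]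
      simp
    · rw [if_neg (by omega : ¬ (PySem.Int.floordiv ((i : Int) * (3 * (i : Int) - 1)) 2 > num ∧
          PySem.Int.floordiv ((i : Int) * (3 * (i : Int) + 1)) 2 > num)),
        if_neg hc1, if_pos (by omega : PySem.Int.floordiv ((i : Int) * (3 * (i : Int) - 1)) 2 ≤ num)]
      by_cases hc2 : PySem.Int.floordiv ((i : Int) * (3 * (i : Int) + 1)) 2 > num
      · rw [if_neg (by omega : ¬ PySem.Int.floordiv ((i : Int) * (3 * (i : Int) + 1)) 2 ≤ num),
          if_pos hc2]
        exact pentLoopA_stop num ((i : Int) + 1) (by omega) (by omega) _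
      · rw [if_pos (by omega : PySem.Int.floordiv ((i : Int) * (3 * (i : Int) + 1)) 2 ≤ num),
          if_neg hc2]
        have hrec := loopMerge num (i + 1) (by omega)
          (acc ++ [(PySem.Int.floordiv ((i : Int) * (3 * (i : Int) - 1)) 2,
                    if PySem.Int.mod (i : Int) 2 ≠ 0 then 1 else -1),
                   (PySem.Int.floordiv ((i : Int) * (3 * (i : Int) + 1)) 2,
                    if PySem.Int.mod (i : Int) 2 ≠ 0 then 1 else -1)])
        push_cast at hrec
        simp only [List.append_assoc, List.cons_append, List.nil_append] at hrec ⊢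
        exact hrec
  · rw [PySem.List.pyRange_one_eq_nil (by omega)]
    simp only [pentLoopA]
    rw [if_pos (by omega : PySem.Int.floordiv ((i : Int) * (3 * (i : Int) - 1)) 2 > num)]
    simp
  termination_by (num + 1 - i).toNat
  decreasing_by omega

-- the merged list has strictly increasing first components, all ≥ g1(i)
theorem mergePairwise (num : Int) (i : Nat) (hi : 1 ≤ i) :
    (pentMergeB (pentSeqB num false i) (pentSeqB num true i)).Pairwise (fun a b => a.1 < b.1) ∧
    ∀ p ∈ pentMergeB (pentSeqB num false i) (pentSeqB num true i),
      PySem.Int.floordiv ((i : Int) * (3 * (i : Int) - 1)) 2 ≤ p.1 := by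
  have hx : (1 : Int) ≤ (i : Int) := by exact_mod_cast hi
  have ec : ((i + 1 : Nat) : Int) = (i : Int) + 1 := by push_cast; ring
  have hfd : ∀ a : Int, PySem.Int.floordiv a 2 = a / 2 := fun a =>
    PySem.Int.floordiv_eq_ediv_of_pos (by norm_num)
  obtain ⟨f1, f2, f3⟩ := pent_facts (i : Int) hx
  rw [mergeAB num i hi]
  simp only [hfd] at f1 f2 f3 ⊢
  by_cases hc1 : (i : Int) * (3 * (i : Int) - 1) / 2 > num
  · rw [if_pos hc1]; simp
  · rw [if_neg hc1]
    by_cases hc2 : (i : Int) * (3 * (i : Int) + 1) / 2 > num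
    · rw [if_pos hc2]; simp
    · rw [if_neg hc2]
      obtain ⟨ihp, ihb⟩ := mergePairwise num (i + 1) (by omega)
      have hb' : ∀ p ∈ pentMergeB (pentSeqB num false (i + 1)) (pentSeqB num true (i + 1)),
          ((i : Int) + 1) * (3 * ((i : Int) + 1) - 1) / 2 ≤ p.1 := by
        intro p hp
        have h := ihb p hp
        rw [ec] at h
        rw [hfd] at h
        exact h
      constructor
      · refine List.Pairwise.cons ?_ (List.Pairwise.cons ?_ ihp)
        · intro b hb
          simp at hb
          rcases hb with hb | hb
          · subst hb; dsimp only; omega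
          · have := hb' b hb; dsimp only; omega
        · intro b hb
          have := hb' b hb; dsimp only; omega
      · intro p hp
        simp at hp
        rcases hp with hp | hp | hp
        · subst hp; dsimp only; omega
        · subst hp; dsimp only; omega
        · have := hb' p hp; omega
  termination_by (num + 1 - i).toNat
  decreasing_by
    have h1 : 2 * (i:Int) ≤ (i:Int) * (3 * (i:Int) - 1) := by nlinarith
    omega

-- folding insertBy over an already strictly ordered list rebuilds it unchanged
theorem foldl_insertBy_self {α : Type} (before : α → α → Bool) (xs : List α)
    (h : xs.Pairwise fun a b => before b a = false) :
    xs.foldl (fun acc x => PySem.List.insertBy before x acc) [] = xs := by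
  induction xs using List.reverseRecOn with
  | nil => rfl
  | append_singleton ys x ih =>
    rw [List.pairwise_append] at h
    obtain ⟨hys, _, hcross⟩ := h
    rw [List.foldl_append, List.foldl_cons, List.foldl_nil, ih hys]
    exact PySem.List.insertBy_of_forall_not_before _ _ _
      (fun y hy => hcross y hy x (by simp))

-- Python's tuple sort is the identity on a list whose first components strictly increase
theorem sorted2_self (xs : List (Int × Int)) (h : xs.Pairwise fun a b => a.1 < b.1) :
    PySem.List.sorted2 xs Prod.fst Prod.snd = xs := by
  simp only [PySem.List.sorted2, if_neg (by simp : ¬ (false = true))]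
  apply foldl_insertBy_self
  refine h.imp ?_
  intro a b hab
  simp [hab, not_lt.mpr (le_of_lt hab)]

-- ===== VERDICT (by name: the statement is the Claim_ definition above) =====
theorem calcPentagon_py_spec : Claim_equal_calcPentagon_py := by
  intro num _
  unfold Spec_calcPentagon_py calcPentagon_py calcPentagon_py_alt
  have h := loopMerge num 1 (le_refl 1) []
  push_cast at h
  rw [h]
  simp only [List.nil_append]
  exact sorted2_self _ (mergePairwise num 1 (le_refl 1)).1
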